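-- pv_equiv track=rewrite | github.com/JH201421228/TIL | self/202308/20230830/problem_9461/problem_9461.py | why_do_this
-- ===== SOURCE A (Python) =====
-- def why_do_this(N):
--     if N < 6:
--         return (N - 1) // 3 + 1
--
--     return_list = [0] * (N + 1)
--     return_list[1] = 1
--     return_list[2] = 1
--     return_list[3] = 1
--     return_list[4] = 2
--     return_list[5] = 2
--
--     for idx in range(6, N+1):
--         return_list[idx] = return_list[idx - 1] + return_list[idx - 5]
--     return return_list[N]
-- ===== SOURCE B (Python) =====
-- # f(n) = f(n-1) + f(n-5): companion-matrix exponentiation by squaring, O(log N) instead of O(N).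
-- def _smul(c, v):
--     return (c * v[0], c * v[1], c * v[2], c * v[3], c * v[4])
--
-- def _vadd(a, b):
--     return (a[0] + b[0], a[1] + b[1], a[2] + b[2], a[3] + b[3], a[4] + b[4])
--
-- def _mul_row(r, B):
--     # row r times matrix B, as a linear combination of B's rows
--     return _vadd(_vadd(_vadd(_vadd(_smul(r[0], B[0]), _smul(r[1], B[1])),
--                              _smul(r[2], B[2])), _smul(r[3], B[3])), _smul(r[4], B[4]))
--
-- def _mmul(A, B):
--     return (_mul_row(A[0], B), _mul_row(A[1], B), _mul_row(A[2], B),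
--             _mul_row(A[3], B), _mul_row(A[4], B))
--
-- _I = ((1, 0, 0, 0, 0), (0, 1, 0, 0, 0), (0, 0, 1, 0, 0), (0, 0, 0, 1, 0), (0, 0, 0, 0, 1))
--
-- def _mat_pow(M, e):
--     if e == 0:
--         return _I
--     h = _mat_pow(M, e // 2)
--     h2 = _mmul(h, h)
--     return h2 if e % 2 == 0 else _mmul(h2, M)
--
-- def why_do_this(N):
--     if N < 6:
--         return (N - 1) // 3 + 1
--     M = ((1, 0, 0, 0, 1), (1, 0, 0, 0, 0), (0, 1, 0, 0, 0), (0, 0, 1, 0, 0), (0, 0, 0, 1, 0))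
--     P = _mat_pow(M, N - 5)
--     r = P[0]
--     # state vector at n=5 .. 1 is (2, 2, 1, 1, 1)
--     return 2 * r[0] + 2 * r[1] + r[2] + r[3] + r[4]
-- ===== Notes on version B (the rewrite author's own statement) =====
-- stated objective: faster
-- what changed: Replaces the O(N) bottom-up DP array with exponentiation-by-squaring of the 5x5 companion matrix of f(n)=f(n-1)+f(n-5), keeping the small-argument closed-form branch unchanged.
import Mathlib
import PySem

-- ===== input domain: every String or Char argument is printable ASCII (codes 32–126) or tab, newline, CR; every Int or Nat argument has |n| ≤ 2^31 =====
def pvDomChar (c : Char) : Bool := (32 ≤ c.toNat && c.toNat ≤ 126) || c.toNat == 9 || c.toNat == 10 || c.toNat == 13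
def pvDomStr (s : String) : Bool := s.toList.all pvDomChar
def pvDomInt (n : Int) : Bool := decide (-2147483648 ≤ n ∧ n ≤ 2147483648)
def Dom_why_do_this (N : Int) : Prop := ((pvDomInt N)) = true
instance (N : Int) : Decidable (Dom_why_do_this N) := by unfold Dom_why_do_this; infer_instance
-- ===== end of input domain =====

-- B replaces A's O(N) DP array by exponentiation-by-squaring of the 5x5 companion matrix
-- of f(n) = f(n-1) + f(n-5); the small-argument closed-form branch is unchanged.

-- ===== PORT A =====
def why_do_this (N : Int) : Int :=
  if N < 6 then PySem.Int.floordiv (N - 1) 3 + 1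
  else
    -- return_list = [0] * (N + 1); indices written / read are always in range here,
    -- so pySetD / pyGetD are exact
    let l0 : List Int := List.replicate (N + 1).toNat 0
    let l1 := PySem.List.pySetD (PySem.List.pySetD (PySem.List.pySetD
                (PySem.List.pySetD (PySem.List.pySetD l0 1 1) 2 1) 3 1) 4 2) 5 2
    let l := (PySem.List.pyRange 6 (N + 1) 1).foldl
      (fun acc idx => PySem.List.pySetD acc idx
        (PySem.List.pyGetD acc (idx - 1) 0 + PySem.List.pyGetD acc (idx - 5) 0)) l1
    PySem.List.pyGetD l N 0

-- ===== PORT B =====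
abbrev pvVec : Type := Int × Int × Int × Int × Int
abbrev pvMat : Type := pvVec × pvVec × pvVec × pvVec × pvVec

def pvSmul (c : Int) (v : pvVec) : pvVec :=
  (c * v.1, c * v.2.1, c * v.2.2.1, c * v.2.2.2.1, c * v.2.2.2.2)

def pvVadd (a b : pvVec) : pvVec :=
  (a.1 + b.1, a.2.1 + b.2.1, a.2.2.1 + b.2.2.1, a.2.2.2.1 + b.2.2.2.1, a.2.2.2.2 + b.2.2.2.2)

def pvMulRow (r : pvVec) (B : pvMat) : pvVec :=
  pvVadd (pvVadd (pvVadd (pvVadd (pvSmul r.1 B.1) (pvSmul r.2.1 B.2.1))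
    (pvSmul r.2.2.1 B.2.2.1)) (pvSmul r.2.2.2.1 B.2.2.2.1)) (pvSmul r.2.2.2.2 B.2.2.2.2)

def pvMmul (A B : pvMat) : pvMat :=
  (pvMulRow A.1 B, pvMulRow A.2.1 B, pvMulRow A.2.2.1 B,
   pvMulRow A.2.2.2.1 B, pvMulRow A.2.2.2.2 B)

def pvI : pvMat :=
  ((1, 0, 0, 0, 0), (0, 1, 0, 0, 0), (0, 0, 1, 0, 0), (0, 0, 0, 1, 0), (0, 0, 0, 0, 1))

def pvMatPow (M : pvMat) (e : Nat) : pvMat :=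
  if e = 0 then pvI
  else
    let h := pvMatPow M (e / 2)
    let h2 := pvMmul h h
    if e % 2 = 0 then h2 else pvMmul h2 M
termination_by e
decreasing_by omega

def why_do_this_alt (N : Int) : Int :=
  if N < 6 then PySem.Int.floordiv (N - 1) 3 + 1
  else
    let M : pvMat := ((1, 0, 0, 0, 1), (1, 0, 0, 0, 0), (0, 1, 0, 0, 0),
                      (0, 0, 1, 0, 0), (0, 0, 0, 1, 0))
    let P := pvMatPow M (N - 5).toNat
    let r := P.1
    2 * r.1 + 2 * r.2.1 + r.2.2.1 + r.2.2.2.1 + r.2.2.2.2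

-- ===== PRECONDITION & SPEC =====
def Spec_why_do_this (N : Int) (out : Int) : Prop := out = why_do_this_alt N
instance (N : Int) (out : Int) : Decidable (Spec_why_do_this N out) := by unfold Spec_why_do_this; infer_instance

-- ===== CLAIM (what is proved, stated in full; the proofs are below) =====
def Claim_equal_why_do_this : Prop := ∀ (N : Int), Dom_why_do_this N → Spec_why_do_this N (why_do_this N)

-- ===== LEMMAS AND PROOFS =====

-- the recurrence sequence: pvF 1..5 = 1,1,1,2,2 and pvF (n+5) = pvF (n+4) + pvF n
def pvF : Nat → Int
  | 0 => 0 | 1 => 1 | 2 => 1 | 3 => 1 | 4 => 2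
  | (n + 5) => pvF (n + 4) + pvF n

def pvDot (a v : pvVec) : Int :=
  a.1 * v.1 + a.2.1 * v.2.1 + a.2.2.1 * v.2.2.1 + a.2.2.2.1 * v.2.2.2.1 + a.2.2.2.2 * v.2.2.2.2

def pvApply (A : pvMat) (v : pvVec) : pvVec :=
  (pvDot A.1 v, pvDot A.2.1 v, pvDot A.2.2.1 v, pvDot A.2.2.2.1 v, pvDot A.2.2.2.2 v)

def pvM : pvMat :=
  ((1, 0, 0, 0, 1), (1, 0, 0, 0, 0), (0, 1, 0, 0, 0), (0, 0, 1, 0, 0), (0, 0, 0, 1, 0))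

def pvWindow (n : Nat) : pvVec :=
  (pvF (n + 4), pvF (n + 3), pvF (n + 2), pvF (n + 1), pvF n)

theorem pvDot_mulRow (r : pvVec) (B : pvMat) (v : pvVec) :
    pvDot (pvMulRow r B) v = pvDot r (pvApply B v) := by
  simp only [pvDot, pvMulRow, pvVadd, pvSmul, pvApply]
  ring

theorem pvApply_mmul (A B : pvMat) (v : pvVec) :
    pvApply (pvMmul A B) v = pvApply A (pvApply B v) := by
  simp only [pvApply, pvMmul, pvDot_mulRow]

theorem pvApply_I (v : pvVec) : pvApply pvI v = v := by
  simp only [pvApply, pvI, pvDot]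
  ring_nf

theorem pvMatPow_apply (e : Nat) (M : pvMat) (v : pvVec) :
    pvApply (pvMatPow M e) v = (pvApply M)^[e] v := by
  induction e using Nat.strong_induction_on generalizing v with
  | _ e ih =>
    rw [pvMatPow]
    by_cases h0 : e = 0
    · simp [h0, pvApply_I]
    · have hlt : e / 2 < e := by omega
      by_cases h2 : e % 2 = 0
      · simp only [h0, if_false, h2, if_true]
        rw [pvApply_mmul, ih _ hlt, ih _ hlt, ← Function.iterate_add_apply]
        congr 1; omega
      · simp only [h0, if_false, h2]
        rw [pvApply_mmul, pvApply_mmul, ih _ hlt, ih _ hlt]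
        rw [show pvApply M v = (pvApply M)^[1] v from rfl,
            ← Function.iterate_add_apply, ← Function.iterate_add_apply]
        congr 1; omega

theorem pvApply_window (n : Nat) : pvApply pvM (pvWindow n) = pvWindow (n + 1) := by
  have h5 : pvF (n + 5) = pvF (n + 4) + pvF n := rfl
  simp only [pvApply, pvM, pvWindow, pvDot, Prod.mk.injEq]
  refine ⟨?_, by ring, by ring, by ring, by ring⟩
  rw [show n + 1 + 4 = n + 5 by ring, h5]; ring

theorem pvIter_window (e n : Nat) : (pvApply pvM)^[e] (pvWindow n) = pvWindow (n + e) := by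
  induction e with
  | zero => rfl
  | succ e ih =>
    rw [Function.iterate_succ_apply', ih, pvApply_window, Nat.add_assoc]

-- B equals pvF on the large branch
theorem why_do_this_alt_eq (N : Int) (h : ¬ N < 6) : why_do_this_alt N = pvF N.toNat := by
  have hw : pvWindow 1 = ((2 : Int), (2 : Int), (1 : Int), (1 : Int), (1 : Int)) := by decide
  have key := pvMatPow_apply (N - 5).toNat pvM (pvWindow 1)
  rw [pvIter_window] at key
  have h5 : 1 + (N - 5).toNat + 4 = N.toNat := by omega
  have h1 : (pvApply (pvMatPow pvM (N - 5).toNat) (pvWindow 1)).1 = pvF N.toNat := by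
    rw [key]
    show pvF (1 + (N - 5).toNat + 4) = _
    rw [h5]
  rw [hw] at h1
  simp only [why_do_this_alt, if_neg h]
  rw [← h1]
  simp [pvM, pvApply, pvDot]
  ring

-- getD after set, for Nat indices
theorem pvGetD_set (l : List Int) (i j : Nat) (v : Int) (hi : i < l.length) :
    (l.set i v).getD j 0 = if j = i then v else l.getD j 0 := by
  rcases Nat.lt_or_ge j l.length with hj | hj
  · rw [List.getD_eq_getElem _ _ (by simpa using hj), List.getElem_set]
    split_ifs with h1 h2 h3
    · rfl
    · omega
    · omega
    · rw [List.getD_eq_getElem _ _ hj]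
  · have hji : j ≠ i := by omega
    rw [if_neg hji, List.getD_eq_default _ _ (by simpa using hj), List.getD_eq_default _ _ hj]

-- the loop invariant for A's fold
theorem pvLoopInv (n : Nat) (hn : 6 ≤ n) (m : Nat) (hm : m ≤ n - 5) :
    ((PySem.List.pyRange 6 (6 + (m : Int)) 1).foldl
      (fun acc idx => PySem.List.pySetD acc idx
        (PySem.List.pyGetD acc (idx - 1) 0 + PySem.List.pyGetD acc (idx - 5) 0))
      ((((((List.replicate (n + 1) (0 : Int)).set 1 1).set 2 1).set 3 1).set 4 2).set 5 2)).length
      = n + 1 ∧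
    ∀ j : Nat, j ≤ 5 + m →
      ((PySem.List.pyRange 6 (6 + (m : Int)) 1).foldl
        (fun acc idx => PySem.List.pySetD acc idx
          (PySem.List.pyGetD acc (idx - 1) 0 + PySem.List.pyGetD acc (idx - 5) 0))
        ((((((List.replicate (n + 1) (0 : Int)).set 1 1).set 2 1).set 3 1).set 4 2).set 5 2)).getD j 0
        = pvF j := by
  induction m with
  | zero =>
    rw [show ((6 : Int) + (0 : Nat)) = 6 by norm_num, PySem.List.pyRange_one_eq_nil (le_refl 6)]
    simp only [List.foldl_nil]
    have hlen : (((((((List.replicate (n + 1) (0 : Int)).set 1 1).set 2 1).set 3 1).set 4 2).set 5 2)).length = n + 1 := by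
      simp
    refine ⟨hlen, ?_⟩
    intro j hj
    rw [pvGetD_set _ _ _ _ (by simp; omega), pvGetD_set _ _ _ _ (by simp; omega),
        pvGetD_set _ _ _ _ (by simp; omega), pvGetD_set _ _ _ _ (by simp; omega),
        pvGetD_set _ _ _ _ (by simp; omega)]
    interval_cases j
    all_goals (simp; decide)
  | succ m ih =>
    have hm' : m ≤ n - 5 := by omega
    obtain ⟨ihlen, ihval⟩ := ih hm'
    have hsplit : PySem.List.pyRange 6 (6 + ((m + 1 : Nat) : Int)) 1
        = PySem.List.pyRange 6 (6 + (m : Int)) 1 ++ [6 + (m : Int)] := by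
      have hc : 6 + ((m + 1 : Nat) : Int) = (6 + (m : Int)) + 1 := by push_cast; ring
      rw [hc, PySem.List.pyRange_one_succ_right (by omega)]
    rw [hsplit, List.foldl_append, List.foldl_cons, List.foldl_nil]
    set L := (PySem.List.pyRange 6 (6 + (m : Int)) 1).foldl
      (fun acc idx => PySem.List.pySetD acc idx
        (PySem.List.pyGetD acc (idx - 1) 0 + PySem.List.pyGetD acc (idx - 5) 0))
      ((((((List.replicate (n + 1) (0 : Int)).set 1 1).set 2 1).set 3 1).set 4 2).set 5 2) with hL
    have hLlen : L.length = n + 1 := ihlen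
    have hcur : ∀ j : Nat, j ≤ 5 + m → L.getD j 0 = pvF j := by
      intro j hj
      have := ihval j hj
      simpa using this
    have e1 : (6 + (m : Int)) - 1 = ((5 + m : Nat) : Int) := by push_cast; ring
    have e5 : (6 + (m : Int)) - 5 = ((1 + m : Nat) : Int) := by push_cast; ring
    rw [e1, e5, PySem.List.pyGetD_natCast, PySem.List.pyGetD_natCast,
        PySem.List.pySetD_of_nonneg _ _ (by omega : (0:Int) ≤ 6 + (m:Int))]
    have ht : ((6 : Int) + (m : Int)).toNat = 6 + m := by omega
    rw [ht, hcur _ (by omega), hcur _ (by omega)]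
    refine ⟨by simp [hLlen], ?_⟩
    intro j hj
    rw [pvGetD_set _ _ _ _ (by rw [hLlen]; omega)]
    split_ifs with hje
    · have key : pvF (m + 1 + 5) = pvF (m + 1 + 4) + pvF (m + 1) := by rfl
      rw [hje, show 6 + m = m + 1 + 5 by ring, key,
          show m + 1 + 4 = 5 + m by ring, show m + 1 = 1 + m by ring]
    · exact hcur j (by omega)

theorem why_do_this_eq (N : Int) (h : ¬ N < 6) : why_do_this N = pvF N.toNat := by
  simp only [why_do_this, if_neg h]
  set n := N.toNat with hn'
  have hn : 6 ≤ n := by omega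
  have hN : N = (n : Int) := by omega
  have hN1 : (N + 1).toNat = n + 1 := by omega
  have hbase : PySem.List.pySetD (PySem.List.pySetD (PySem.List.pySetD
      (PySem.List.pySetD (PySem.List.pySetD (List.replicate ((N + 1).toNat) (0 : Int)) 1 1) 2 1) 3 1) 4 2) 5 2
      = ((((((List.replicate (n + 1) (0 : Int)).set 1 1).set 2 1).set 3 1).set 4 2).set 5 2) := by
    rw [hN1]
    simp [PySem.List.pySetD_of_nonneg]
  have hr : N + 1 = 6 + ((n - 5 : Nat) : Int) := by omega
  rw [hbase, hr]
  obtain ⟨-, hval⟩ := pvLoopInv n hn (n - 5) (le_refl _)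
  have := hval n (by omega)
  rw [hN, PySem.List.pyGetD_natCast]
  exact this

-- ===== VERDICT (by name: the statement is the Claim_ definition above) =====
theorem why_do_this_spec : Claim_equal_why_do_this := by
  intro N _
  unfold Spec_why_do_this
  by_cases h : N < 6
  · rw [why_do_this, why_do_this_alt, if_pos h, if_pos h]
  · rw [why_do_this_eq N h, why_do_this_alt_eq N h]
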